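-- pv_equiv track=rewrite | github.com/eddmpython/dartlab | src/dartlab/providers/dart/docs/sections/chunker.py | separateTableAndText
-- ===== SOURCE A (Python) =====
-- def separateTableAndText(content: str) -> tuple[str, list[str], int]:
--     """content를 텍스트 / 테이블로 분리.
--
--     Returns:
--         (textOnly, tableHeaders, tableRowCount)
--     """
--     lines = content.split("\n")
--     textLines: list[str] = []
--     tableHeaders: list[str] = []
--     tableRowCount = 0
--     inTable = False
--     headerCaptured = False
--
--     for line in lines:
--         stripped = line.strip()
--         if stripped.startswith("|"):
--             tableRowCount += 1
--             if not inTable: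
--                 inTable = True
--                 headerCaptured = False
--             if not headerCaptured and "---" not in stripped:
--                 cells = [c.strip() for c in stripped.split("|") if c.strip()]
--                 if cells and cells != ["---"]:
--                     tableHeaders.append(" | ".join(cells[:5]))
--                     headerCaptured = True
--         else:
--             if inTable:
--                 inTable = False
--                 headerCaptured = False
--             if stripped:
--                 textLines.append(line)
--
--     return "\n".join(textLines), tableHeaders, tableRowCount
-- ===== SOURCE B (Python) =====
-- def _firstHeader(suffix: list[str]):
--     """First usable header line of the table run starting at suffix[0], or None."""
--     for line in suffix:
--         stripped = line.strip()
--         if not stripped.startswith("|"):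
--             break
--         if "---" in stripped:
--             continue
--         cells = [c.strip() for c in stripped.split("|") if c.strip()]
--         if cells:
--             return " | ".join(cells[:5])
--     return None
--
--
-- def separateTableAndText(content: str) -> tuple[str, list[str], int]:
--     """content를 텍스트 / 테이블로 분리.
--
--     Returns:
--         (textOnly, tableHeaders, tableRowCount)
--     """
--     lines = content.split("\n")
--     isTab = [l.strip().startswith("|") for l in lines]
--     tableRowCount = sum(1 if t else 0 for t in isTab)
--     textLines = [l for l, t in zip(lines, isTab) if not t and l.strip()]
--     tableHeaders = []
--     for i, t in enumerate(isTab):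
--         if t and (i == 0 or not isTab[i - 1]):
--             h = _firstHeader(lines[i:])
--             if h is not None:
--                 tableHeaders.append(h)
--     return "\n".join(textLines), tableHeaders, tableRowCount
-- ===== Notes on version B (the rewrite author's own statement) =====
-- stated objective: alternative
-- what changed: Replaces A's single stateful pass (inTable/headerCaptured flags mutated per line) by staged independent passes over a precomputed boolean mask: count = sum of the mask, text = a zip-filter comprehension, and headers found by detecting run starts via index comparison with the previous mask entry and scanning the suffix slice for the first usable header line.
import Mathlib
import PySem

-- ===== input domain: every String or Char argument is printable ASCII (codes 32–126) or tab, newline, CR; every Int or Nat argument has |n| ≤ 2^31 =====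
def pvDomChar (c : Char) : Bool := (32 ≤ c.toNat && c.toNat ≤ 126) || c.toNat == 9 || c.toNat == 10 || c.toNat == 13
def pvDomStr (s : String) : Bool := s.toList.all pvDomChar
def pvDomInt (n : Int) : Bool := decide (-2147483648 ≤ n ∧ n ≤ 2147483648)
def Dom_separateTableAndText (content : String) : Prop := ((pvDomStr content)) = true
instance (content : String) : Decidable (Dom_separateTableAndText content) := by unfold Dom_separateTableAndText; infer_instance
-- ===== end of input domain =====

-- B replaces A's single stateful pass (inTable/headerCaptured flags) by staged passes over a
-- precomputed table-line mask: count = sum of the mask, text = zip-filter, headers by detecting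
-- run starts (mask[i] and not mask[i-1]) and scanning the suffix for the first usable header.
-- Same return value; objective: alternative decomposition, no speed claim.

-- ===== PORT A =====
-- s.split(sep) with the non-empty literal separator: PySem.Chars.splitOn is exact there
-- (PySem.Str.split? sep = "" ↦ none never fires for these literal separators).
def sepSplit (s : String) (sep : String) : List String :=
  (PySem.Chars.splitOn s.toList sep.toList).map String.ofList

-- the loop body of A; state = (textLines, tableHeaders, tableRowCount, inTable, headerCaptured)
def sepStepA (st : List String × List String × Int × Bool × Bool) (line : String) :
    List String × List String × Int × Bool × Bool :=
  let (textLines, tableHeaders, count, inTable, headerCaptured) := st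
  let stripped := PySem.Str.strip line
  if PySem.Str.startswith stripped "|" then
    let count := count + 1
    let (inTable, headerCaptured) :=
      if !inTable then (true, false) else (inTable, headerCaptured)
    if !headerCaptured && !(PySem.Str.isIn "---" stripped) then
      let cells := ((sepSplit stripped "|").map PySem.Str.strip).filter (fun c => c ≠ "")
      if cells ≠ [] ∧ cells ≠ ["---"] then
        (textLines, tableHeaders ++ [PySem.Str.join " | " (cells.take 5)], count, inTable, true)
      else (textLines, tableHeaders, count, inTable, headerCaptured)
    else (textLines, tableHeaders, count, inTable, headerCaptured)
  else
    let (inTable, headerCaptured) :=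
      if inTable then (false, false) else (inTable, headerCaptured)
    if PySem.Str.strip line ≠ "" then
      (textLines ++ [line], tableHeaders, count, inTable, headerCaptured)
    else (textLines, tableHeaders, count, inTable, headerCaptured)

def separateTableAndText (content : String) : String × List String × Int :=
  let lines := sepSplit content "\n"
  let st := lines.foldl sepStepA ([], [], 0, false, false)
  (PySem.Str.join "\n" st.1, st.2.1, st.2.2.1)

-- ===== PORT B =====
-- B's helper _firstHeader: for/break/continue over the suffix ≅ structural recursion
def sepFirstHeader (suffix : List String) : Option String :=
  match suffix with
  | [] => none
  | line :: rest =>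
    let stripped := PySem.Str.strip line
    if !PySem.Str.startswith stripped "|" then none          -- break
    else if PySem.Str.isIn "---" stripped then sepFirstHeader rest  -- continue
    else
      let cells := ((sepSplit stripped "|").map PySem.Str.strip).filter (fun c => c ≠ "")
      if cells ≠ [] then some (PySem.Str.join " | " (cells.take 5))
      else sepFirstHeader rest

def separateTableAndText_alt (content : String) : String × List String × Int :=
  let lines := sepSplit content "\n"
  let isTab := lines.map (fun l => PySem.Str.startswith (PySem.Str.strip l) "|")
  let tableRowCount : Int := isTab.foldl (fun a t => a + if t then 1 else 0) 0
  let textLines := ((lines.zip isTab).filter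
    (fun p => !p.2 && PySem.Str.strip p.1 ≠ "")).map Prod.fst
  let tableHeaders := (PySem.List.enumerate isTab 0).foldl
    (fun acc p =>
      if p.2 && (p.1 == 0 || !(PySem.List.pyGetD isTab (p.1 - 1) false)) then
        match sepFirstHeader (PySem.List.slice lines (some p.1) none) with
        | some h => acc ++ [h]
        | none => acc
      else acc) []
  (PySem.Str.join "\n" textLines, tableHeaders, tableRowCount)

-- ===== PRECONDITION & SPEC =====
def Spec_separateTableAndText (content : String) (out : String × List String × Int) : Prop := out = separateTableAndText_alt content
instance (content : String) (out : String × List String × Int) : Decidable (Spec_separateTableAndText content out) := by unfold Spec_separateTableAndText; infer_instance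

-- ===== CLAIM (what is proved, stated in full; the proofs are below) =====
def Claim_equal_separateTableAndText : Prop := ∀ (content : String), Dom_separateTableAndText content → Spec_separateTableAndText content (separateTableAndText content)

-- ===== LEMMAS AND PROOFS =====

def sepIsTable (line : String) : Bool :=
  PySem.Str.startswith (PySem.Str.strip line) "|"

-- the (≤ 1) headers A captures in a maximal table run
def sepHeaderOf (run : List String) : List String :=
  match run with
  | [] => []
  | line :: rest =>
    let stripped := PySem.Str.strip line
    if PySem.Str.isIn "---" stripped then sepHeaderOf rest
    else
      let cells := ((sepSplit stripped "|").map PySem.Str.strip).filter (fun c => c ≠ "")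
      if cells ≠ [] then [PySem.Str.join " | " (cells.take 5)] else sepHeaderOf rest

-- line-by-line header recursion matching B's run-start detection; prev = previous line is a table line
def sepHdrs (ls : List String) (prev : Bool) : List String :=
  match ls with
  | [] => []
  | l :: rest =>
    (if sepIsTable l && !prev then
       (match sepFirstHeader (l :: rest) with | some h => [h] | none => [])
     else []) ++ sepHdrs rest (sepIsTable l)

-- every piece produced by splitOn is a contiguous infix of the original string
theorem sep_go_mem_infix (sep : List Char) :
    ∀ (fuel : Nat) (l cur : List Char) (acc : List (List Char)) (cs0 : List Char),
      (cur.reverse ++ l) <:+: cs0 → (∀ p ∈ acc, p <:+: cs0) →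
      ∀ p ∈ PySem.Chars.splitOn.go sep fuel l cur acc, p <:+: cs0 := by
  intro fuel
  induction fuel with
  | zero =>
    intro l cur acc cs0 hinv hacc p hp
    simp [PySem.Chars.splitOn.go] at hp
    rcases hp with h | h
    · exact hacc p h
    · exact h ▸ hinv
  | succ fuel ih =>
    intro l cur acc cs0 hinv hacc p hp
    cases l with
    | nil =>
      simp [PySem.Chars.splitOn.go] at hp
      rcases hp with h | h
      · exact hacc p h
      · subst h; exact List.IsInfix.trans ⟨[], [], by simp⟩ hinv
    | cons c rest =>
      rw [PySem.Chars.splitOn.go] at hp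
      by_cases hpre : sep.isPrefixOf (c :: rest) = true
      · simp only [hpre, if_true] at hp
        refine ih _ [] _ cs0 ?_ ?_ p hp
        · exact List.IsInfix.trans (by simpa using (List.drop_suffix sep.length (c :: rest)).isInfix)
            (List.IsInfix.trans ⟨cur.reverse, [], by simp⟩ hinv)
        · intro q hq
          rcases List.mem_cons.mp hq with rfl | hq'
          · exact List.IsInfix.trans ⟨[], c :: rest, rfl⟩ hinv
          · exact hacc _ hq'
      · simp only [hpre] at hp
        refine ih _ _ _ cs0 ?_ hacc p hp
        simpa using hinv

theorem sep_mem_splitOn_infix (cs sep p : List Char) (h : p ∈ PySem.Chars.splitOn cs sep) :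
    p <:+: cs :=
  sep_go_mem_infix sep _ cs [] [] cs (by simp) (by simp) p h

theorem sep_strip_infix (cs : List Char) : PySem.Chars.strip cs <:+: cs := by
  have h1 : PySem.Chars.lstrip cs <:+ cs := List.dropWhile_suffix _
  have h2 : PySem.Chars.rstrip (PySem.Chars.lstrip cs) <+: PySem.Chars.lstrip cs := by
    have := List.dropWhile_suffix (l := (PySem.Chars.lstrip cs).reverse) PySem.Chars.isspace
    unfold PySem.Chars.rstrip
    rw [show PySem.Chars.lstrip cs = (PySem.Chars.lstrip cs).reverse.reverse by simp]
    exact List.reverse_prefix.mpr (by simpa using this)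
  exact List.IsInfix.trans h2.isInfix h1.isInfix

-- if "---" does not occur in stripped, no cell can be "---"
theorem sep_cells_ne (s : String) (h : PySem.Str.isIn "---" s = false) :
    ((sepSplit s "|").map PySem.Str.strip).filter (fun c => c ≠ "") ≠ ["---"] := by
  intro heq
  have hmem : ("---" : String) ∈ ((sepSplit s "|").map PySem.Str.strip).filter (fun c => c ≠ "") := by
    rw [heq]; simp
  have hmem2 := List.mem_of_mem_filter hmem
  rcases List.mem_map.mp hmem2 with ⟨p, hp, hstrip⟩
  rcases List.mem_map.mp hp with ⟨q, hq, rfl⟩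
  have hq' : q <:+: s.toList := sep_mem_splitOn_infix _ _ _ hq
  have hql : (String.ofList q).toList = q := by simp
  have : PySem.Chars.strip q = "---".toList := by
    have := congrArg String.toList hstrip
    simpa [PySem.Str.strip, hql] using this
  have h3 : "---".toList <:+: q := this ▸ sep_strip_infix q
  have h4 : PySem.Str.isIn "---" s = true := (PySem.Str.isIn_iff_infix _ _).mpr (h3.trans hq')
  rw [h4] at h
  simp at h

theorem stepA_tt (t h : List String) (c : Int) (x : String)
    (hx : sepIsTable x = true) :
    sepStepA (t, h, c, true, true) x = (t, h, c + 1, true, true) := by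
  simp only [sepIsTable] at hx
  simp only [sepStepA, hx]
  simp

theorem stepA_txt (t h : List String) (c : Int) (b : Bool) (line : String)
    (hl : sepIsTable line = false) :
    sepStepA (t, h, c, true, b) line =
      (t ++ (if PySem.Str.strip line ≠ "" then [line] else []), h, c, false, false) := by
  simp only [sepIsTable] at hl
  simp only [sepStepA, hl]
  split_ifs <;> simp_all

theorem stepA_txt0 (t h : List String) (c : Int) (line : String)
    (hl : sepIsTable line = false) :
    sepStepA (t, h, c, false, false) line =
      (t ++ (if PySem.Str.strip line ≠ "" then [line] else []), h, c, false, false) := by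
  simp only [sepIsTable] at hl
  simp only [sepStepA, hl]
  split_ifs <;> simp_all

theorem stepA_entry (t h : List String) (c : Int) (hc0 : Bool) (x : String)
    (hx : sepIsTable x = true) :
    sepStepA (t, h, c, false, hc0) x = sepStepA (t, h, c, true, false) x := by
  simp only [sepIsTable] at hx
  simp only [sepStepA, hx]
  simp

theorem sep_foldl_congr (ys : List String) {s1 s2 : List String × List String × Int × Bool × Bool}
    (h : s1 = s2) : ys.foldl sepStepA s1 = ys.foldl sepStepA s2 := by rw [h]

theorem sep_TB_true (xs : List String) (hxs : ∀ x ∈ xs, sepIsTable x = true) :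
    ∀ (ys t h : List String) (c : Int),
      (xs ++ ys).foldl sepStepA (t, h, c, true, true) =
        ys.foldl sepStepA (t, h, c + xs.length, true, true) := by
  induction xs with
  | nil => simp
  | cons x xs ih =>
    intro ys t h c
    rw [List.cons_append, List.foldl_cons, stepA_tt _ _ _ _ (hxs x List.mem_cons_self),
      ih (fun y hy => hxs y (List.mem_cons_of_mem _ hy))]
    exact sep_foldl_congr ys (by simp only [List.length_cons]; push_cast; ring_nf)

theorem sep_TB_false (xs : List String) (hxs : ∀ x ∈ xs, sepIsTable x = true) :
    ∀ (ys t h : List String) (c : Int),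
      (xs ++ ys).foldl sepStepA (t, h, c, true, false) =
        ys.foldl sepStepA (t, h ++ sepHeaderOf xs, c + xs.length, true,
          decide (sepHeaderOf xs ≠ [])) := by
  induction xs with
  | nil => intro ys t h c; simp [sepHeaderOf]
  | cons x xs ih =>
    intro ys t h c
    have hx : PySem.Str.startswith (PySem.Str.strip x) "|" = true := hxs x List.mem_cons_self
    rw [List.cons_append, List.foldl_cons]
    by_cases hIn : PySem.Str.isIn "---" (PySem.Str.strip x) = true
    · have hstep : sepStepA (t, h, c, true, false) x = (t, h, c + 1, true, false) := by
        simp only [sepStepA, hx, hIn]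
        simp
      have hhd : sepHeaderOf (x :: xs) = sepHeaderOf xs := by
        simp only [sepHeaderOf, hIn]
        simp
      rw [hstep, ih (fun y hy => hxs y (List.mem_cons_of_mem _ hy)), hhd]
      exact sep_foldl_congr ys (by simp only [List.length_cons]; push_cast; ring_nf)
    · have hIn' : PySem.Str.isIn "---" (PySem.Str.strip x) = false := by
        simpa using hIn
      set cells := ((sepSplit (PySem.Str.strip x) "|").map PySem.Str.strip).filter
        (fun c => c ≠ "") with hcells
      by_cases hne : cells = []
      · have hstep : sepStepA (t, h, c, true, false) x = (t, h, c + 1, true, false) := by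
          simp only [sepStepA, hx, hIn', ← hcells, hne]
          simp
        have hhd : sepHeaderOf (x :: xs) = sepHeaderOf xs := by
          simp only [sepHeaderOf, hIn', ← hcells, hne, Bool.false_eq_true, if_false]
          simp
        rw [hstep, ih (fun y hy => hxs y (List.mem_cons_of_mem _ hy)), hhd]
        exact sep_foldl_congr ys (by simp only [List.length_cons]; push_cast; ring_nf)
      · have hdash : cells ≠ ["---"] := sep_cells_ne _ hIn'
        have hstep : sepStepA (t, h, c, true, false) x =
            (t, h ++ [PySem.Str.join " | " (cells.take 5)], c + 1, true, true) := by
          simp only [sepStepA, hx, hIn', ← hcells]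
          simp [hne, hdash]
        have hhd : sepHeaderOf (x :: xs) = [PySem.Str.join " | " (cells.take 5)] := by
          simp only [sepHeaderOf, hIn', ← hcells, Bool.false_eq_true, if_false]
          rw [if_pos hne]
        rw [hstep, sep_TB_true xs (fun y hy => hxs y (List.mem_cons_of_mem _ hy)), hhd]
        exact sep_foldl_congr ys (by
          simp only [List.length_cons, ne_eq]
          refine congrArg₂ _ rfl (congrArg₂ _ rfl (congrArg₂ _ (by push_cast; ring) rfl)))

theorem sep_TXT (xs : List String) (hxs : ∀ x ∈ xs, sepIsTable x = false) :
    ∀ (ys t h : List String) (c : Int),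
      (xs ++ ys).foldl sepStepA (t, h, c, false, false) =
        ys.foldl sepStepA (t ++ xs.filter (fun x => PySem.Str.strip x ≠ ""), h, c, false, false) := by
  induction xs with
  | nil => simp
  | cons x xs ih =>
    intro ys t h c
    rw [List.cons_append, List.foldl_cons, stepA_txt0 _ _ _ _ (hxs x List.mem_cons_self),
      ih (fun y hy => hxs y (List.mem_cons_of_mem _ hy))]
    exact sep_foldl_congr ys (by
      by_cases hb : PySem.Str.strip x ≠ "" <;> simp [hb])

-- ---- sepHdrs run lemmas ----

-- prev is irrelevant when the list is empty or starts with a non-table line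
theorem sepHdrs_boundary (ys : List String)
    (hy : ys = [] ∨ ∃ l rest, ys = l :: rest ∧ sepIsTable l = false) (p q : Bool) :
    sepHdrs ys p = sepHdrs ys q := by
  rcases hy with rfl | ⟨l, rest, rfl, hl⟩
  · rfl
  · simp [sepHdrs, hl]

-- inside a table run (prev = true) nothing is emitted
theorem sepHdrs_table_tail (xs : List String) (hxs : ∀ x ∈ xs, sepIsTable x = true) :
    ∀ (ys : List String), sepHdrs (xs ++ ys) true = sepHdrs ys true := by
  induction xs with
  | nil => intro ys; rfl
  | cons x xs ih =>
    intro ys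
    have hx := hxs x List.mem_cons_self
    simp only [List.cons_append, sepHdrs, hx, Bool.not_true, Bool.and_false]
    simpa using ih (fun y hy => hxs y (List.mem_cons_of_mem _ hy)) ys

-- sepFirstHeader on a full table run (followed by a boundary) computes sepHeaderOf of the run
theorem sepFirstHeader_run (xs : List String) (hxs : ∀ x ∈ xs, sepIsTable x = true)
    (ys : List String) (hy : ys = [] ∨ ∃ l rest, ys = l :: rest ∧ sepIsTable l = false) :
    (match sepFirstHeader (xs ++ ys) with | some h => [h] | none => []) = sepHeaderOf xs := by
  induction xs with
  | nil =>
    rcases hy with rfl | ⟨l, rest, rfl, hl⟩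
    · rfl
    · have hl' : PySem.Str.startswith (PySem.Str.strip l) "|" = false := hl
      simp only [List.nil_append, sepFirstHeader, hl', Bool.not_false, if_true, sepHeaderOf]
  | cons x xs ih =>
    have hx : PySem.Str.startswith (PySem.Str.strip x) "|" = true := hxs x List.mem_cons_self
    have htail := ih (fun y hy' => hxs y (List.mem_cons_of_mem _ hy'))
    by_cases hIn : PySem.Str.isIn "---" (PySem.Str.strip x) = true
    · simp only [List.cons_append, sepFirstHeader, sepHeaderOf, hx, Bool.not_true,
        Bool.false_eq_true, if_false, hIn, if_true]
      exact htail
    · have hIn' : PySem.Str.isIn "---" (PySem.Str.strip x) = false := by simpa using hIn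
      simp only [List.cons_append, sepFirstHeader, sepHeaderOf, hx, Bool.not_true,
        Bool.false_eq_true, if_false, hIn']
      by_cases hne : ((sepSplit (PySem.Str.strip x) "|").map PySem.Str.strip).filter
          (fun c => c ≠ "") = []
      · rw [if_neg (not_not_intro hne), if_neg (not_not_intro hne)]
        exact htail
      · rw [if_pos hne, if_pos hne]

-- a fresh table run contributes sepHeaderOf run, then the boundary continues with prev = false
theorem sepHdrs_table_run (x : String) (xs ys : List String)
    (hxs : ∀ y ∈ x :: xs, sepIsTable y = true)
    (hy : ys = [] ∨ ∃ l rest, ys = l :: rest ∧ sepIsTable l = false) :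
    sepHdrs ((x :: xs) ++ ys) false = sepHeaderOf (x :: xs) ++ sepHdrs ys false := by
  have hx := hxs x List.mem_cons_self
  have htail : ∀ y ∈ xs, sepIsTable y = true := fun y hy' => hxs y (List.mem_cons_of_mem _ hy')
  simp only [List.cons_append, sepHdrs, hx, Bool.not_false, Bool.and_true, if_true]
  rw [show xs ++ ys = xs ++ ys from rfl, sepHdrs_table_tail xs htail ys,
    sepHdrs_boundary ys hy true false]
  have := sepFirstHeader_run (x :: xs) hxs ys hy
  rw [← this]
  simp

-- a non-empty text run contributes nothing to the headers
theorem sepHdrs_text_run (xs : List String) (hne : xs ≠ [])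
    (hxs : ∀ x ∈ xs, sepIsTable x = false) (ys : List String) (p : Bool) :
    sepHdrs (xs ++ ys) p = sepHdrs ys false := by
  induction xs generalizing p with
  | nil => exact absurd rfl hne
  | cons x xs ih =>
    have hx := hxs x List.mem_cons_self
    simp only [List.cons_append, sepHdrs, hx, Bool.false_and, Bool.false_eq_true, if_false,
      List.nil_append]
    cases xs with
    | nil => rfl
    | cons z zs =>
      exact ih (by simp) (fun y hy => hxs y (List.mem_cons_of_mem _ hy)) false

def sepProj (st : List String × List String × Int × Bool × Bool) :
    List String × List String × Int := (st.1, st.2.1, st.2.2.1)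

-- A's fold, in component form
theorem sep_main (n : Nat) :
    ∀ (lines : List String), lines.length ≤ n → ∀ (t h : List String) (c : Int),
      sepProj (lines.foldl sepStepA (t, h, c, false, false)) =
        (t ++ lines.filter (fun l => !sepIsTable l && PySem.Str.strip l ≠ ""),
         h ++ sepHdrs lines false,
         c + ((lines.filter sepIsTable).length : Int)) := by
  induction n with
  | zero =>
    intro lines hlen t h c
    have : lines = [] := List.eq_nil_of_length_eq_zero (Nat.le_zero.mp hlen)
    subst this
    simp [sepProj, sepHdrs]
  | succ n ih =>
    intro lines hlen t h c
    cases lines with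
    | nil => simp [sepProj, sepHdrs]
    | cons l rest =>
      have hrest : rest.length ≤ n := Nat.le_of_succ_le_succ hlen
      by_cases hk : sepIsTable l = true
      · -- table run
        set run := l :: rest.takeWhile (fun x => sepIsTable x == true) with hrun
        set rest' := rest.dropWhile (fun x => sepIsTable x == true) with hrest'
        have hsplit : l :: rest = run ++ rest' := by
          rw [hrun, hrest']
          simp [List.takeWhile_append_dropWhile]
        have hallrun : ∀ x ∈ run, sepIsTable x = true := by
          intro x hx
          rcases List.mem_cons.mp hx with rfl | hx'
          · exact hk
          · simpa using List.mem_takeWhile_imp hx'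
        have hlen' : rest'.length ≤ n := le_trans (List.length_dropWhile_le _ rest) hrest
        have hbound : rest' = [] ∨ ∃ l' xs, rest' = l' :: xs ∧ sepIsTable l' = false := by
          cases hrc : rest' with
          | nil => exact Or.inl rfl
          | cons l' xs =>
            refine Or.inr ⟨l', xs, rfl, ?_⟩
            have := List.head?_dropWhile_not (fun x => sepIsTable x == true) rest
            rw [← hrest', hrc] at this
            simpa using this
        have hfold : (run ++ rest').foldl sepStepA (t, h, c, false, false) =
            rest'.foldl sepStepA (t, h ++ sepHeaderOf run, c + run.length, true,
              decide (sepHeaderOf run ≠ [])) := by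
          rw [hrun, List.cons_append, List.foldl_cons,
            stepA_entry t h c false l hk, ← List.foldl_cons, ← List.cons_append, ← hrun]
          exact sep_TB_false run hallrun rest' t h c
        have hfiltT : run.filter (fun x => !sepIsTable x && PySem.Str.strip x ≠ "") = [] := by
          rw [List.filter_eq_nil_iff]
          intro x hx
          simp [hallrun x hx]
        have hfiltC : run.filter sepIsTable = run := List.filter_eq_self.mpr hallrun
        have hhdr : sepHdrs (run ++ rest') false = sepHeaderOf run ++ sepHdrs rest' false := by
          rw [hrun]
          exact sepHdrs_table_run l _ rest' (hrun ▸ hallrun) hbound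
        rw [hsplit, hfold]
        rcases hbound with hb | ⟨l', xs, hrc, hl'⟩
        · rw [hb] at hhdr ⊢
          have hh2 : sepHdrs run false = sepHeaderOf run := by
            rw [List.append_nil] at hhdr
            simpa [sepHdrs] using hhdr
          simp only [List.append_nil, List.foldl_nil, sepProj, hfiltT, hfiltC, hh2]
        · rw [hrc, List.foldl_cons, stepA_txt _ _ _ _ _ hl', ← stepA_txt0 _ _ _ _ hl',
            ← List.foldl_cons, ← hrc, ih rest' hlen']
          rw [hhdr]
          simp only [List.filter_append, hfiltT, hfiltC]
          refine congrArg₂ _ (by simp) (congrArg₂ _ (by simp) ?_)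
          simp only [List.length_append]
          push_cast
          ring
      · -- text run
        have hk' : sepIsTable l = false := by simpa using hk
        set run := l :: rest.takeWhile (fun x => sepIsTable x == false) with hrun
        set rest' := rest.dropWhile (fun x => sepIsTable x == false) with hrest'
        have hsplit : l :: rest = run ++ rest' := by
          rw [hrun, hrest']
          simp [List.takeWhile_append_dropWhile]
        have hallrun : ∀ x ∈ run, sepIsTable x = false := by
          intro x hx
          rcases List.mem_cons.mp hx with rfl | hx'
          · exact hk'
          · simpa using List.mem_takeWhile_imp hx'
        have hlen' : rest'.length ≤ n := le_trans (List.length_dropWhile_le _ rest) hrest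
        have hfiltT : run.filter (fun x => !sepIsTable x && PySem.Str.strip x ≠ "") =
            run.filter (fun x => PySem.Str.strip x ≠ "") := by
          apply List.filter_congr
          intro x hx
          simp [hallrun x hx]
        have hfiltC : run.filter sepIsTable = [] := by
          rw [List.filter_eq_nil_iff]
          intro x hx
          simp [hallrun x hx]
        have hhdr : sepHdrs (run ++ rest') false = sepHdrs rest' false :=
          sepHdrs_text_run run (by rw [hrun]; simp) hallrun rest' false
        rw [hsplit, sep_TXT run hallrun rest' t h c, ih rest' hlen']
        rw [hhdr]
        simp only [List.filter_append, hfiltT, hfiltC]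
        simp

-- ---- B-side component lemmas ----

theorem sepB_count (bs : List Bool) :
    ∀ (c : Int), bs.foldl (fun a t => a + if t then 1 else 0) c =
      c + ((bs.filter id).length : Int) := by
  induction bs with
  | nil => simp
  | cons b bs ih =>
    intro c
    cases b
    · simp [ih]
    · simp [ih]
      ring

theorem sepB_text (f : String → Bool) (lines : List String) :
    ((lines.zip (lines.map f)).filter (fun p => !p.2 && PySem.Str.strip p.1 ≠ "")).map Prod.fst =
      lines.filter (fun l => !f l && PySem.Str.strip l ≠ "") := by
  induction lines with
  | nil => rfl
  | cons l rest ih =>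
    simp only [List.map_cons, List.zip_cons_cons, List.filter_cons]
    split_ifs <;> simp_all

-- prev flag read by sepHdrs at position pre.length
def sepPrev (pre : List String) : Bool :=
  match pre.getLast? with
  | none => false
  | some l => sepIsTable l

-- B's enumerate fold computes sepHdrs
set_option maxHeartbeats 1000000 in
theorem sepB_hdrs (lines0 : List String) :
    ∀ (suf pre acc : List String), lines0 = pre ++ suf →
      (PySem.List.enumerate (suf.map sepIsTable) (pre.length : Int)).foldl
        (fun acc p =>
          if p.2 && (p.1 == 0 || !(PySem.List.pyGetD (lines0.map sepIsTable) (p.1 - 1) false)) then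
            match sepFirstHeader (PySem.List.slice lines0 (some p.1) none) with
            | some h => acc ++ [h]
            | none => acc
          else acc) acc = acc ++ sepHdrs suf (sepPrev pre) := by
  intro suf
  induction suf with
  | nil => intro pre acc _; simp [sepHdrs]
  | cons l rest ih =>
    intro pre acc hsplit
    rw [List.map_cons, PySem.List.enumerate_cons, List.foldl_cons]
    have hslice : PySem.List.slice lines0 (some (pre.length : Int)) none = l :: rest := by
      rw [PySem.List.slice_from_natCast, hsplit, List.drop_left]
    have hcond : (((pre.length : Int) == 0) ||
        !(PySem.List.pyGetD (lines0.map sepIsTable) ((pre.length : Int) - 1) false)) =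
        !sepPrev pre := by
      cases hpre : pre.getLast? with
      | none =>
        have : pre = [] := by cases pre <;> simp_all
        subst this
        simp [sepPrev, hpre]
      | some x =>
        have hpne : pre ≠ [] := by intro h; rw [h] at hpre; simp at hpre
        have hplen : pre.length ≠ 0 := by simpa [List.length_eq_zero_iff] using hpne
        have h1 : ((pre.length : Int) - 1) = ((pre.length - 1 : Nat) : Int) := by omega
        have h2 : PySem.List.pyGetD (lines0.map sepIsTable) ((pre.length : Int) - 1) false =
            sepIsTable x := by
          rw [h1, PySem.List.pyGetD_natCast, hsplit, List.map_append, List.getD,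
            List.getElem?_append_left (by simp; omega), List.getElem?_map]
          have : pre[pre.length - 1]? = some x := by
            rw [← hpre, List.getLast?_eq_getElem?]
          simp [this]
        rw [h2]
        simp [sepPrev, hpre, hplen]
    rw [hslice]
    simp only [hcond]
    have hstate : (if (sepIsTable l && !sepPrev pre) = true then
        match sepFirstHeader (l :: rest) with | some h => acc ++ [h] | none => acc
      else acc) = acc ++ (if (sepIsTable l && !sepPrev pre) = true then
        (match sepFirstHeader (l :: rest) with | some h => [h] | none => []) else []) := by
      by_cases hc : (sepIsTable l && !sepPrev pre) = true
      · rw [hc]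
        simp only [if_true]
        cases sepFirstHeader (l :: rest) <;> simp
      · have hc' : (sepIsTable l && !sepPrev pre) = false := by simpa using hc
        rw [hc']
        simp
    rw [hstate]
    have hrec := ih (pre ++ [l]) (acc ++ (if (sepIsTable l && !sepPrev pre) = true then
        (match sepFirstHeader (l :: rest) with | some h => [h] | none => []) else []))
      (by rw [hsplit]; simp)
    have hlen : (((pre ++ [l]).length : Nat) : Int) = ((pre.length : Nat) : Int) + 1 := by simp
    rw [hlen] at hrec
    have hprev : sepPrev (pre ++ [l]) = sepIsTable l := by simp [sepPrev]
    rw [hprev] at hrec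
    rw [show (sepHdrs (l :: rest) (sepPrev pre)) =
        (if (sepIsTable l && !sepPrev pre) = true then
          (match sepFirstHeader (l :: rest) with | some h => [h] | none => []) else []) ++
          sepHdrs rest (sepIsTable l) from rfl]
    rw [← List.append_assoc]
    exact hrec

-- ===== VERDICT (by name: the statement is the Claim_ definition above) =====
set_option maxHeartbeats 1000000 in
theorem separateTableAndText_spec : Claim_equal_separateTableAndText := by
  intro content _
  unfold Spec_separateTableAndText separateTableAndText separateTableAndText_alt
  have hA := sep_main (sepSplit content "\n").length (sepSplit content "\n") le_rfl [] [] 0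
  simp only [sepProj, Prod.mk.injEq] at hA
  obtain ⟨h1, h2, h3⟩ := hA
  have hH := sepB_hdrs (sepSplit content "\n") (sepSplit content "\n") [] [] (by simp)
  simp only [List.length_nil, Nat.cast_zero, List.nil_append] at hH
  have hPrev : sepPrev ([] : List String) = false := rfl
  rw [hPrev] at hH
  have hcnt : ((List.filter (fun l => PySem.Str.startswith (PySem.Str.strip l) "|")
      (sepSplit content "\n")).length : Int) =
      ((List.filter id ((sepSplit content "\n").map
        (fun l => PySem.Str.startswith (PySem.Str.strip l) "|"))).length : Int) := by
    rw [List.filter_map]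
    simp
  have hfun : sepIsTable = (fun l => PySem.Str.startswith (PySem.Str.strip l) "|") := rfl
  rw [hfun] at h1 h3 hH
  simp only [] at h1
  simp only [h1, h2, h3, sepB_count, sepB_text, hH, hcnt, List.nil_append, zero_add]
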